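-- pv_equiv track=rewrite | github.com/roma-goodok/guca-evolution-lab | src/guca/fitness/planar_basic.py | _canon_cycle_key
-- ===== SOURCE A (Python) =====
-- from typing import Dict, List, Optional, Sequence, Set, Tuple, Hashable
--
-- Hash = Hashable
--
-- def _canon_cycle_key(cyc: Sequence[Hash]) -> Tuple[Hash, ...]:
--     """
--     Canonical key for a cycle ignoring rotation and direction (uses str() labels).
--     """
--     s = list(cyc)
--     if len(s) > 1 and s[0] == s[-1]:
--         s = s[:-1]
--
--     def best_rotation(seq: List[Hash]) -> Tuple[Hash, ...]:
--         n = len(seq)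
--         labels = [str(x) for x in seq]
--         min_label = min(labels)
--         idxs = [i for i, lab in enumerate(labels) if lab == min_label]
--         candidates = [tuple(seq[i:] + seq[:i]) for i in idxs]
--         return min(candidates)
--
--     fwd = best_rotation(s)
--     bwd = best_rotation(list(reversed(s)))
--     return min(fwd, bwd)
-- ===== SOURCE B (Python) =====
-- from typing import Hashable, Sequence, Tuple
--
-- Hash = Hashable
--
-- def _canon_cycle_key(cyc: Sequence[Hash]) -> Tuple[Hash, ...]:
--     """
--     Canonical key for a cycle ignoring rotation and direction (uses str() labels).
--
--     Single keyed minimization: every rotation of the trimmed sequence and of its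
--     reverse is scored by the composite key (str(first element), rotation tuple),
--     and the rotation of the single global minimum is the answer.
--     """
--     s = list(cyc)
--     if len(s) > 1 and s[0] == s[-1]:
--         s = s[:-1]
--     best = None
--     for seq in (s, s[::-1]):
--         for i in range(len(seq)):
--             rot = tuple(seq[i:] + seq[:i])
--             key = (str(seq[i]), rot)
--             if best is None or key < best:
--                 best = key
--     return best[1]
-- ===== Notes on version B (the rewrite author's own statement) =====
-- stated objective: alternative
-- what changed: Replaces the two-phase per-direction search (collect min-label positions, min over those rotations, then min of forward/backward winners) by one running minimization over all 2n rotations of both directions under the composite key (str(first element), rotation tuple).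
-- outside the precondition, e.g. on _canon_cycle_key([]): A raises ValueError, B raises TypeError
import Mathlib
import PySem

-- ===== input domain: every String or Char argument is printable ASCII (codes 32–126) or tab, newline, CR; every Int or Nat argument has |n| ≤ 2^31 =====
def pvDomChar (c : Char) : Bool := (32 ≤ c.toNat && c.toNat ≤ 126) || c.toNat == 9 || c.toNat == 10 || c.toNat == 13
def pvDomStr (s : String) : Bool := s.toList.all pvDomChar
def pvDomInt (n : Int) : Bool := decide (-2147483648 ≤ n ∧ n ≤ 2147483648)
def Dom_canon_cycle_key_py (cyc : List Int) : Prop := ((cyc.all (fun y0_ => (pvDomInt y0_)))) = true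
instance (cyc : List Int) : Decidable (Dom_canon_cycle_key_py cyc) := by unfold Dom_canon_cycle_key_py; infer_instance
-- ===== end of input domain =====

-- B replaces A's two-phase search (min-label positions, then min rotation per direction,
-- then min of the two winners) by ONE running minimization over all rotations of both
-- directions under the composite key (str(first element), rotation); objective: alternative.

-- ===== PORT A =====
-- best_rotation(seq): labels, min label, min-label indices, min of those rotations
def pvBestRotation (seq : List Int) : Option (List Int) :=
  let labels := seq.map PySem.Int.toStr
  match PySem.List.min? labels (fun x => x) with
  | none => none            -- min([]) raises ValueError: excluded by Pre_
  | some minLabel =>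
    let idxs := ((PySem.List.enumerate labels).filter (fun p => p.2 == minLabel)).map (fun p => p.1)
    let candidates := idxs.map (fun i =>
      PySem.List.slice seq (some i) none ++ PySem.List.slice seq none (some i))
    PySem.List.min? candidates (fun x => x)

def canon_cycle_key_py (cyc : List Int) : List Int :=
  let s0 := cyc
  let s := if decide (1 < s0.length) && (PySem.List.pyGet? s0 0 == PySem.List.pyGet? s0 (-1)) then
      PySem.List.slice s0 none (some (-1)) else s0
  match pvBestRotation s, pvBestRotation s.reverse with
  | some fwd, some bwd => if bwd < fwd then bwd else fwd
  | _, _ => []              -- unreachable under Pre_ (A raises on empty input)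

-- ===== PORT B =====
-- key < best on (str, tuple) pairs: Python tuple comparison, first component decides, tie on the rotation
def pvKeyLt (a b : String × List Int) : Bool :=
  decide (a.1 < b.1) || (a.1 == b.1 && decide (a.2 < b.2))

-- the inner 'for i in range(len(seq))' loop of Source B, threading the running best
def pvScan (seq : List Int) (best : Option (String × List Int)) : Option (String × List Int) :=
  (PySem.List.pyRange 0 (seq.length : Int) 1).foldl (fun best i =>
    let rot := PySem.List.slice seq (some i) none ++ PySem.List.slice seq none (some i)
    let key := (PySem.Int.toStr (PySem.List.pyGetD seq i 0), rot)
    match best with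
    | none => some key
    | some b => if pvKeyLt key b then some key else some b) best

def canon_cycle_key_py_alt (cyc : List Int) : List Int :=
  let s0 := cyc
  let s := if decide (1 < s0.length) && (PySem.List.pyGet? s0 0 == PySem.List.pyGet? s0 (-1)) then
      PySem.List.slice s0 none (some (-1)) else s0
  match pvScan s.reverse (pvScan s none) with
  | some b => b.2
  | none => []              -- unreachable under Pre_ (Source B raises on empty input)

-- ===== PRECONDITION & SPEC =====
-- Pre_ excludes only the empty sequence, on which A raises ValueError (min of an empty list)
-- and B raises TypeError (subscripting None).
def Pre_canon_cycle_key_py (cyc : List Int) : Prop := cyc ≠ []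
instance (cyc : List Int) : Decidable (Pre_canon_cycle_key_py cyc) := by
  unfold Pre_canon_cycle_key_py; infer_instance
def pvWitness_canon_cycle_key_py : List Int := [3, 1, 2]

def Spec_canon_cycle_key_py (cyc : List Int) (out : List Int) : Prop := out = canon_cycle_key_py_alt cyc
instance (cyc : List Int) (out : List Int) : Decidable (Spec_canon_cycle_key_py cyc out) := by
  unfold Spec_canon_cycle_key_py; infer_instance

-- ===== CLAIM (what is proved, stated in full; the proofs are below) =====
def Claim_equal_canon_cycle_key_py : Prop := ∀ (cyc : List Int), Dom_canon_cycle_key_py cyc → Pre_canon_cycle_key_py cyc → Spec_canon_cycle_key_py cyc (canon_cycle_key_py cyc)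

-- ===== LEMMAS AND PROOFS =====

-- the key B assigns to the rotation of seq starting at position j
def pvKeyAt (seq : List Int) (j : Nat) : String × List Int :=
  (PySem.Int.toStr (seq.getD j 0), seq.drop j ++ seq.take j)

def pvKeys (seq : List Int) : List (String × List Int) := (List.range seq.length).map (pvKeyAt seq)

-- min?'s folding step at key = toLex, named so the folds can be compared
def pvStep (acc : Option (String × List Int)) (x : String × List Int) :
    Option (String × List Int) :=
  match acc with
  | none => some x
  | some m => if toLex x < toLex m then some x else some m

theorem pvKeyLt_eq (a b : String × List Int) :
    pvKeyLt a b = decide (toLex a < toLex b) := by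
  simp [pvKeyLt, Prod.Lex.lt_iff]
  rw [show (a.1 == b.1) = decide (a.1 = b.1) by by_cases h : a.1 = b.1 <;> simp [h]]

theorem pvMin?_eq_foldl (xs : List (String × List Int)) :
    PySem.List.min? xs (fun k => toLex k) = xs.foldl pvStep none := by
  unfold PySem.List.min?
  apply PySem.List.foldl_congr_mem
  intro acc x hx
  cases acc with
  | none => rfl
  | some m => simp [pvStep]

theorem pvScan_eq (seq : List Int) (best : Option (String × List Int)) :
    pvScan seq best = (pvKeys seq).foldl pvStep best := by
  unfold pvScan pvKeys
  rw [PySem.List.pyRange_zero_natCast, List.foldl_map, List.foldl_map]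
  apply PySem.List.foldl_congr_mem
  intro acc j hj
  simp only [PySem.List.pyGetD_natCast, pvKeyAt, pvStep,
    PySem.List.slice_from seq (a := (j : Int)) (by positivity),
    PySem.List.slice_to seq (b := (j : Int)) (by positivity), Int.toNat_natCast, pvKeyLt_eq]
  cases acc with
  | none => rfl
  | some m => simp

theorem pvEnum_eq (xs : List String) (k : Int) :
    PySem.List.enumerate xs k
      = (List.range xs.length).map (fun (j : Nat) => ((k + j : Int), xs.getD j "")) := by
  induction xs generalizing k with
  | nil => rfl
  | cons x t ih =>
    simp only [PySem.List.enumerate, List.length_cons, List.range_succ_eq_map, List.map_cons,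
      List.map_map, ih]
    refine List.cons_eq_cons.mpr ⟨by simp, ?_⟩
    apply List.map_congr_left
    intro j hj
    have : (k + 1 + (j : Int)) = k + ((j : Nat) + 1 : Nat) := by push_cast; ring
    simp [Function.comp, Nat.succ_eq_add_one, this]

theorem pvSlice_neg_one (xs : List Int) :
    PySem.List.slice xs none (some (-1)) = xs.dropLast := by
  cases xs with
  | nil => rfl
  | cons x t =>
    unfold PySem.List.slice
    rw [List.dropLast_eq_take]
    simp

-- the candidates list of best_rotation, normalised
theorem pvCandidates_eq (seq : List Int) (mlab : String) :
    (((PySem.List.enumerate (seq.map PySem.Int.toStr)).filter (fun p => p.2 == mlab)).map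
        (fun p => p.1)).map (fun i =>
          PySem.List.slice seq (some i) none ++ PySem.List.slice seq none (some i))
      = (((List.range seq.length).filter
            (fun j => (seq.map PySem.Int.toStr).getD j "" == mlab)).map
          (fun j => seq.drop j ++ seq.take j)) := by
  rw [pvEnum_eq]
  rw [List.filter_map]
  simp only [List.map_map, List.length_map]
  apply List.map_congr_left
  intro j hj
  simp only [Function.comp]
  rw [PySem.List.slice_from seq (a := ((0:Int) + j)) (by positivity),
      PySem.List.slice_to seq (b := ((0:Int) + j)) (by positivity)]
  norm_num

theorem pvBest_some (seq : List Int) (hne : seq ≠ []) : ∃ f, pvBestRotation seq = some f := by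
  unfold pvBestRotation
  have hlne : seq.map PySem.Int.toStr ≠ [] := by simpa using hne
  obtain ⟨mlab, hm⟩ : ∃ m, PySem.List.min? (seq.map PySem.Int.toStr) (fun x => x) = some m := by
    cases h : PySem.List.min? (seq.map PySem.Int.toStr) (fun x => x) with
    | none => exact absurd ((PySem.List.min?_eq_none_iff _ _).mp h) hlne
    | some m => exact ⟨m, rfl⟩
  simp only [hm]
  simp only [pvCandidates_eq]
  have hmem := PySem.List.min?_mem hm
  obtain ⟨j, hjlen, hjget⟩ := List.mem_iff_getElem.mp hmem
  have hj : j ∈ (List.range seq.length).filter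
      (fun j => (seq.map PySem.Int.toStr).getD j "" == mlab) := by
    rw [List.mem_filter, List.mem_range]
    refine ⟨by simpa using hjlen, ?_⟩
    rw [List.getD_eq_getElem _ _ hjlen]
    simp [hjget]
  have hmem2 : (seq.drop j ++ seq.take j) ∈ ((List.range seq.length).filter
      (fun j => (seq.map PySem.Int.toStr).getD j "" == mlab)).map
        (fun j => seq.drop j ++ seq.take j) := List.mem_map_of_mem hj
  cases h : PySem.List.min? (((List.range seq.length).filter
      (fun j => (seq.map PySem.Int.toStr).getD j "" == mlab)).map
        (fun j => seq.drop j ++ seq.take j)) (fun x => x) with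
  | none =>
    rw [PySem.List.min?_eq_none_iff] at h
    rw [h] at hmem2
    exact absurd hmem2 (List.not_mem_nil)
  | some f => exact ⟨f, rfl⟩

theorem pvBest_spec (seq : List Int) (f : List Int) (mlab : String)
    (hm : PySem.List.min? (seq.map PySem.Int.toStr) (fun x => x) = some mlab)
    (hf : pvBestRotation seq = some f) :
    (mlab, f) ∈ pvKeys seq ∧ ∀ k ∈ pvKeys seq, toLex ((mlab, f) : String × List Int) ≤ toLex k := by
  unfold pvBestRotation at hf
  simp only [hm] at hf
  simp only [pvCandidates_eq] at hf
  have hlabel : ∀ j : Nat, j < seq.length →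
      PySem.Int.toStr (seq.getD j 0) = (seq.map PySem.Int.toStr).getD j "" := by
    intro j hj
    have hj' : j < (seq.map PySem.Int.toStr).length := by simpa using hj
    rw [List.getD_eq_getElem _ _ hj', List.getElem_map, List.getD_eq_getElem _ _ hj]
  -- the index at which f is achieved
  obtain ⟨j, hjf, hrots⟩ := List.mem_map.mp (PySem.List.min?_mem hf)
  rw [List.mem_filter, List.mem_range] at hjf
  obtain ⟨hjlen, hjlab⟩ := hjf
  have hjlab' : (seq.map PySem.Int.toStr).getD j "" = mlab := by simpa using hjlab
  have hkeyj : pvKeyAt seq j = (mlab, f) := by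
    unfold pvKeyAt
    simp only [Prod.mk.injEq]
    exact ⟨by rw [hlabel j hjlen, hjlab'], hrots⟩
  constructor
  · exact hkeyj ▸ List.mem_map_of_mem (List.mem_range.mpr hjlen)
  · intro k hk
    obtain ⟨j', hj', hkj'⟩ := List.mem_map.mp hk
    rw [List.mem_range] at hj'
    have hlab' : PySem.Int.toStr (seq.getD j' 0) = (seq.map PySem.Int.toStr).getD j' "" :=
      hlabel j' hj'
    have hmem' : (seq.map PySem.Int.toStr).getD j' "" ∈ seq.map PySem.Int.toStr := by
      rw [List.getD_eq_getElem _ _ (by simpa using hj')]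
      exact List.getElem_mem _
    have hle : mlab ≤ PySem.Int.toStr (seq.getD j' 0) := by
      rw [hlab']
      simpa using PySem.List.min?_isMin hm _ hmem'
    rcases lt_or_eq_of_le hle with hlt | heq
    · rw [← hkj']
      exact le_of_lt (Prod.Lex.lt_iff.mpr (Or.inl hlt))
    · -- equal labels: j' is also a min-label index, compare the rotations themselves
      have hj'filter : j' ∈ (List.range seq.length).filter
          (fun j => (seq.map PySem.Int.toStr).getD j "" == mlab) := by
        rw [List.mem_filter, List.mem_range]
        refine ⟨hj', ?_⟩
        simp only [beq_iff_eq]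
        rw [← hlab']
        exact heq.symm
      have hrot' : (seq.drop j' ++ seq.take j') ∈ ((List.range seq.length).filter
          (fun j => (seq.map PySem.Int.toStr).getD j "" == mlab)).map
            (fun j => seq.drop j ++ seq.take j) := List.mem_map_of_mem hj'filter
      have hfle : f ≤ seq.drop j' ++ seq.take j' := by
        simpa using PySem.List.min?_isMin (key := fun (x : List Int) => x) (m := f)
          (by convert hf using 2) _ hrot'
      rw [← hkj']
      exact Prod.Lex.le_iff.mpr (Or.inr ⟨heq, hfle⟩)

theorem pvMlab_rev (seq : List Int) (mlab mlab' : String)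
    (hm : PySem.List.min? (seq.map PySem.Int.toStr) (fun x => x) = some mlab)
    (hm' : PySem.List.min? (seq.reverse.map PySem.Int.toStr) (fun x => x) = some mlab') :
    mlab' = mlab := by
  have h1 : mlab ∈ seq.map PySem.Int.toStr := PySem.List.min?_mem hm
  have h2 : mlab' ∈ seq.reverse.map PySem.Int.toStr := PySem.List.min?_mem hm'
  rw [List.map_reverse, List.mem_reverse] at h2
  have h3 : mlab ≤ mlab' := by simpa using PySem.List.min?_isMin hm mlab' h2
  have h4 : mlab' ≤ mlab := by
    have h1' : mlab ∈ seq.reverse.map PySem.Int.toStr := by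
      rw [List.map_reverse, List.mem_reverse]; exact h1
    simpa using PySem.List.min?_isMin hm' mlab h1'
  exact le_antisymm h4 h3

-- the two match-bodies agree on every nonempty trimmed sequence
theorem pvMain (s : List Int) (hne : s ≠ []) :
    (match pvBestRotation s, pvBestRotation s.reverse with
     | some fwd, some bwd => if bwd < fwd then bwd else fwd
     | _, _ => ([] : List Int)) =
    (match pvScan s.reverse (pvScan s none) with
     | some b => b.2
     | none => []) := by
  have hrne : s.reverse ≠ [] := by simpa using hne
  obtain ⟨fwd, hfwd⟩ := pvBest_some s hne
  obtain ⟨bwd, hbwd⟩ := pvBest_some s.reverse hrne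
  obtain ⟨mlab, hm⟩ : ∃ m, PySem.List.min? (s.map PySem.Int.toStr) (fun x => x) = some m := by
    cases h : PySem.List.min? (s.map PySem.Int.toStr) (fun x => x) with
    | none => exact absurd ((PySem.List.min?_eq_none_iff _ _).mp h) (by simpa using hne)
    | some m => exact ⟨m, rfl⟩
  obtain ⟨mlab', hm'⟩ : ∃ m, PySem.List.min? (s.reverse.map PySem.Int.toStr) (fun x => x) = some m := by
    cases h : PySem.List.min? (s.reverse.map PySem.Int.toStr) (fun x => x) with
    | none => exact absurd ((PySem.List.min?_eq_none_iff _ _).mp h) (by simpa using hne)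
    | some m => exact ⟨m, rfl⟩
  have hml : mlab' = mlab := pvMlab_rev s mlab mlab' hm hm'
  rw [hml] at hm'
  obtain ⟨hmemF, hminF⟩ := pvBest_spec s fwd mlab hm hfwd
  obtain ⟨hmemR, hminR⟩ := pvBest_spec s.reverse bwd mlab hm' hbwd
  -- B's running best is the keyed minimum over the concatenated key list
  have hB : pvScan s.reverse (pvScan s none)
      = PySem.List.min? (pvKeys s ++ pvKeys s.reverse) (fun k => toLex k) := by
    rw [pvScan_eq, pvScan_eq, ← List.foldl_append, pvMin?_eq_foldl]
  have hallne : pvKeys s ++ pvKeys s.reverse ≠ [] := by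
    intro hctr
    rcases List.append_eq_nil_iff.mp hctr with ⟨h1, _⟩
    have h2 : List.range s.length = [] := List.map_eq_nil_iff.mp h1
    rw [List.range_eq_nil] at h2
    exact hne (List.length_eq_zero_iff.mp h2)
  obtain ⟨m, hmB⟩ : ∃ m, PySem.List.min? (pvKeys s ++ pvKeys s.reverse) (fun k => toLex k)
      = some m := by
    cases h : PySem.List.min? (pvKeys s ++ pvKeys s.reverse) (fun k => toLex k) with
    | none => exact absurd ((PySem.List.min?_eq_none_iff _ _).mp h) hallne
    | some m => exact ⟨m, rfl⟩
  have hmemB : m ∈ pvKeys s ++ pvKeys s.reverse := PySem.List.min?_mem hmB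
  have hminB : ∀ k ∈ pvKeys s ++ pvKeys s.reverse, toLex m ≤ toLex k := by
    intro k hk
    simpa using PySem.List.min?_isMin (key := fun (k : String × List Int) => toLex k) (m := m)
      (by convert hmB using 2) k hk
  rw [hfwd, hbwd, hB, hmB]
  simp only []
  by_cases hbf : bwd < fwd
  · -- the reversed direction wins strictly
    have hminAll : ∀ k ∈ pvKeys s ++ pvKeys s.reverse,
        toLex ((mlab, bwd) : String × List Int) ≤ toLex k := by
      intro k hk
      rcases List.mem_append.mp hk with hk | hk
      · have hlt : toLex ((mlab, bwd) : String × List Int)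
            < toLex ((mlab, fwd) : String × List Int) :=
          Prod.Lex.lt_iff.mpr (Or.inr ⟨rfl, hbf⟩)
        exact le_trans (le_of_lt hlt) (hminF k hk)
      · exact hminR k hk
    have h1 : toLex ((mlab, bwd) : String × List Int) ≤ toLex m := hminAll m hmemB
    have h2 : toLex m ≤ toLex ((mlab, bwd) : String × List Int) :=
      hminB _ (List.mem_append_right _ hmemR)
    have hEq : ((mlab, bwd) : String × List Int) = m :=
      toLex.injective (le_antisymm h1 h2)
    simp [hbf, ← hEq]
  · -- the forward direction wins (ties go forward)
    have hfb : fwd ≤ bwd := le_of_not_gt hbf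
    have hminAll : ∀ k ∈ pvKeys s ++ pvKeys s.reverse,
        toLex ((mlab, fwd) : String × List Int) ≤ toLex k := by
      intro k hk
      rcases List.mem_append.mp hk with hk | hk
      · exact hminF k hk
      · have hle' : toLex ((mlab, fwd) : String × List Int)
            ≤ toLex ((mlab, bwd) : String × List Int) :=
          Prod.Lex.le_iff.mpr (Or.inr ⟨rfl, hfb⟩)
        exact le_trans hle' (hminR k hk)
    have h1 : toLex ((mlab, fwd) : String × List Int) ≤ toLex m := hminAll m hmemB
    have h2 : toLex m ≤ toLex ((mlab, fwd) : String × List Int) :=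
      hminB _ (List.mem_append_left _ hmemF)
    have hEq : ((mlab, fwd) : String × List Int) = m :=
      toLex.injective (le_antisymm h1 h2)
    simp [hbf, ← hEq]

-- ===== VERDICT (by name: the statement is the Claim_ definition above) =====
theorem canon_cycle_key_py_spec : Claim_equal_canon_cycle_key_py := by
  unfold Claim_equal_canon_cycle_key_py
  intro cyc _ hpre
  unfold Spec_canon_cycle_key_py canon_cycle_key_py canon_cycle_key_py_alt
  have hsne : (if decide (1 < cyc.length)
        && (PySem.List.pyGet? cyc 0 == PySem.List.pyGet? cyc (-1)) then
      PySem.List.slice cyc none (some (-1)) else cyc) ≠ [] := by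
    split_ifs with h
    · rw [pvSlice_neg_one]
      have h1 : 1 < cyc.length := by
        have := (Bool.and_eq_true _ _).mp h
        simpa using this.1
      intro hc
      have := congrArg List.length hc
      simp [List.length_dropLast] at this
      omega
    · exact hpre
  exact pvMain _ hsne
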